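-- pv_equiv track=rewrite | github.com/AlexandriaChemistry/SaptACT | mol_csv_api.py | to_latex_formula
-- ===== SOURCE A (Python) =====
-- def to_latex_formula(formula):
--     myq = ""
--     if formula.find("-"):
--         w = formula.split("-")
--         formula = w[0]
--         if len(w) > 1:
--             myq     = ("$^{-%s}$" % w[1])
--     elif formula.find("+"):
--         w = formula.split("+")
--         formula = w[0]
--         if len(w) > 1:
--             myq     = ("$^{+%s}$" % w[1])
--
--     for i in range(10):
--         istr = str(i)
--         jstr = ("$_%d$" % i)
--         formula = formula.replace(istr, jstr)
--     return formula + myq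
-- ===== SOURCE B (Python) =====
-- def to_latex_formula(formula):
--     charge = ""
--     body = formula
--     if "-" in formula:
--         parts = formula.split("-")
--         body = parts[0]
--         charge = "$^{-%s}$" % parts[1]
--     elif "+" in formula:
--         parts = formula.split("+")
--         body = parts[0]
--         charge = "$^{+%s}$" % parts[1]
--     return "".join("$_%s$" % c if c.isdigit() else c for c in body) + charge
-- ===== Notes on version B (the rewrite author's own statement) =====
-- stated objective: alternative
-- what changed: B detects the charge by ordinary substring membership ('-' in / elif '+' in) and replaces A's ten whole-string str.replace passes by a single left-to-right character scan that emits a LaTeX subscript group per digit.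
-- intended difference: On formulas that start with '-' or contain '+' but no '-', A's find() truthiness test misfires and A returns the formula with the charge sign left in the body (A('H+') = 'H+'), while B returns the intended superscript charge markup (B('H+') = 'H$^{+}$'), which is what the LaTeX converter is meant to produce. — e.g. on to_latex_formula("H+"): A returns "H+", B returns "H$^{+}$"
import Mathlib
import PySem

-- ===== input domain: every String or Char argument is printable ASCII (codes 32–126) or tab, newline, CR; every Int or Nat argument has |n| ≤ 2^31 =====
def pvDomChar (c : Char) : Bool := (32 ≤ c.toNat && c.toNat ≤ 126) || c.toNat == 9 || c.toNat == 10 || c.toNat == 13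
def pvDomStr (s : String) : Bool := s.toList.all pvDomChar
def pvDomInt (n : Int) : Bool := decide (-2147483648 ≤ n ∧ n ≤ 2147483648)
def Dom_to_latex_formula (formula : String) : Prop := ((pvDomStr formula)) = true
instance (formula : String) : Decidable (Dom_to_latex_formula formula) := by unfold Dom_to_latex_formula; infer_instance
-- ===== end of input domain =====

-- B replaces A's ten whole-string `replace` passes by one character scan over the
-- formula body, and splits off the charge by ordinary membership tests ('-' in /
-- elif '+' in); outside D_ below the two agree (objective: alternative decomposition).

-- ===== PORT A =====
def to_latex_formula (formula : String) : String :=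
  let myq : String := ""
  let st : String × String :=
    if PySem.Str.find formula "-" ≠ 0 then            -- `if formula.find("-"):` (0 falsy)
      let w := (PySem.Str.split? formula "-").getD [] -- sep ≠ "" so split? is `some`
      let formula := PySem.List.pyGetD w 0 ""         -- w[0] (split always non-empty)
      if 1 < PySem.List.len w then
        (formula, PySem.Str.join "" ["$^{-", PySem.List.pyGetD w 1 "", "}$"])
      else (formula, myq)
    else if PySem.Str.find formula "+" ≠ 0 then
      let w := (PySem.Str.split? formula "+").getD []
      let formula := PySem.List.pyGetD w 0 ""
      if 1 < PySem.List.len w then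
        (formula, PySem.Str.join "" ["$^{+", PySem.List.pyGetD w 1 "", "}$"])
      else (formula, myq)
    else (formula, myq)
  let f := (PySem.List.pyRange 0 10 1).foldl
    (fun f i => PySem.Str.replace f (PySem.Int.toStr i)
        (PySem.Str.join "" ["$_", PySem.Int.toStr i, "$"])) st.1
  PySem.Str.join "" [f, st.2]

-- ===== PORT B =====
def to_latex_formula_alt (formula : String) : String :=
  let st : String × String :=
    if PySem.Str.isIn "-" formula then                -- `if "-" in formula:`
      let parts := (PySem.Str.split? formula "-").getD []   -- sep ≠ "" so split? is `some`
      (PySem.List.pyGetD parts 0 "",                        -- parts[0], parts[1] (both exist: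
        PySem.Str.join "" ["$^{-", PySem.List.pyGetD parts 1 "", "}$"])  -- sep occurs)
    else if PySem.Str.isIn "+" formula then
      let parts := (PySem.Str.split? formula "+").getD []
      (PySem.List.pyGetD parts 0 "",
        PySem.Str.join "" ["$^{+", PySem.List.pyGetD parts 1 "", "}$"])
    else (formula, "")
  PySem.Str.join ""
    [PySem.Str.join "" (st.1.toList.map (fun c =>
        if PySem.Chars.isdigit c then PySem.Str.join "" ["$_", String.ofList [c], "$"]
        else String.ofList [c])),
     st.2]

-- ===== PRECONDITION & SPEC =====
-- On formulas that start with '-', or contain '+' but no '-', A's `find(...)` truthiness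
-- test misfires: A leaves the sign inside the body (e.g. A "H+" = "H+", A "-1" = "-$_1$")
-- while B renders the charge as the intended superscript (B "H+" = "H$^{+}$"); B's value
-- is the intended LaTeX markup.
def D_to_latex_formula (formula : String) : Prop :=
  PySem.Str.startswith formula "-" = true ∨
    (PySem.Str.isIn "+" formula = true ∧ PySem.Str.isIn "-" formula = false)
instance (formula : String) : Decidable (D_to_latex_formula formula) := by
  unfold D_to_latex_formula; infer_instance

def Spec_to_latex_formula (formula : String) (out : String) : Prop :=
  ¬ D_to_latex_formula formula → out = to_latex_formula_alt formula
instance (formula : String) (out : String) : Decidable (Spec_to_latex_formula formula out) := by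
  unfold Spec_to_latex_formula; infer_instance

def pvDiffWitness_to_latex_formula : String := "H+"
def pvDiffWitnessOut_to_latex_formula : String × String := ("H+", "H$^{+}$")

-- ===== CLAIM (what is proved, stated in full; the proofs are below) =====
def Claim_unchanged_to_latex_formula : Prop := ∀ (formula : String), Dom_to_latex_formula formula → Spec_to_latex_formula formula (to_latex_formula formula)
def Claim_changed_to_latex_formula : Prop := Dom_to_latex_formula (pvDiffWitness_to_latex_formula) ∧ D_to_latex_formula (pvDiffWitness_to_latex_formula) ∧ to_latex_formula (pvDiffWitness_to_latex_formula) = pvDiffWitnessOut_to_latex_formula.1 ∧ to_latex_formula_alt (pvDiffWitness_to_latex_formula) = pvDiffWitnessOut_to_latex_formula.2 ∧ pvDiffWitnessOut_to_latex_formula.1 ≠ pvDiffWitnessOut_to_latex_formula.2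
def Claim_exact_to_latex_formula : Prop := ∀ (formula : String), Dom_to_latex_formula formula → D_to_latex_formula formula → to_latex_formula formula ≠ to_latex_formula_alt formula

-- ===== LEMMAS AND PROOFS =====

-- s.find(sub) == 0 exactly when sub is a prefix (library find_spec/find_nonneg_iff).
theorem pv_find_eq_zero_iff (s sub : List Char) :
    PySem.Chars.find s sub = 0 ↔ sub <+: s := by
  constructor
  · intro h
    have h0 : 0 ≤ PySem.Chars.find s sub := by omega
    have hp := (PySem.Chars.find_spec h0).1
    rw [h] at hp; simpa using hp
  · intro hp
    have h0 : 0 ≤ PySem.Chars.find s sub :=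
      (PySem.Chars.find_nonneg_iff s sub).mpr hp.isInfix
    rcases eq_or_lt_of_le h0 with h | h
    · omega
    · exact absurd (by simpa using hp) (not_not_intro ((PySem.Chars.find_spec h0).2 0 (by omega)))

-- the per-character splitter that splitOn.go computes for a one-character separator
def pvSplit (c : Char) : List Char → List Char → List (List Char)
  | [], cur => [cur.reverse]
  | x :: rest, cur =>
    if x = c then cur.reverse :: pvSplit c rest [] else pvSplit c rest (x :: cur)

theorem pv_go_single (c : Char) : ∀ (l : List Char) (fuel : Nat) (cur : List Char)
    (acc : List (List Char)), l.length ≤ fuel →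
    PySem.Chars.splitOn.go [c] fuel l cur acc = acc.reverse ++ pvSplit c l cur := by
  intro l
  induction l with
  | nil =>
    intro fuel cur acc _
    cases fuel <;> rw [PySem.Chars.splitOn.go] <;> simp [pvSplit]
  | cons x rest ih =>
    intro fuel cur acc hle
    cases fuel with
    | zero => simp at hle
    | succ m =>
      rw [PySem.Chars.splitOn.go]
      simp only [List.length_cons] at hle
      by_cases hx : x = c
      · subst hx
        rw [if_pos (by simp [List.isPrefixOf])]
        simp only [List.length_singleton, List.drop_succ_cons, List.drop_zero]
        rw [ih m [] (cur.reverse :: acc) (by omega)]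
        simp [pvSplit]
      · rw [if_neg (by simp [List.isPrefixOf]; exact fun h => hx h.symm)]
        rw [ih m (x :: cur) acc (by omega)]
        simp [pvSplit, hx]

theorem pv_splitOn_single (s : List Char) (c : Char) :
    PySem.Chars.splitOn s [c] = pvSplit c s [] := by
  rw [PySem.Chars.splitOn, pv_go_single c s (s.length + 1) [] [] (by omega)]
  simp

theorem pv_len_pvSplit (c : Char) : ∀ (l cur : List Char),
    (pvSplit c l cur).length = l.count c + 1 := by
  intro l
  induction l with
  | nil => intro cur; simp [pvSplit]
  | cons x rest ih =>
    intro cur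
    by_cases hx : x = c <;> simp [pvSplit, hx, ih]

theorem pv_pvSplit_not_mem (c : Char) : ∀ (l cur : List Char), c ∉ l →
    pvSplit c l cur = [cur.reverse ++ l] := by
  intro l
  induction l with
  | nil => intro cur _; simp [pvSplit]
  | cons x rest ih =>
    intro cur hm
    simp only [List.mem_cons, not_or] at hm
    rw [pvSplit, if_neg (fun h => hm.1 h.symm), ih (x :: cur) hm.2]
    simp

theorem pv_pvSplit_head (c : Char) : ∀ (l cur : List Char), ∃ t,
    pvSplit c l cur = (cur.reverse ++ l.takeWhile (· ≠ c)) :: t := by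
  intro l
  induction l with
  | nil => intro cur; exact ⟨[], by simp [pvSplit]⟩
  | cons x rest ih =>
    intro cur
    by_cases hx : x = c
    · refine ⟨pvSplit c rest [], ?_⟩
      rw [pvSplit, if_pos hx]
      simp [hx]
    · obtain ⟨t, ht⟩ := ih (x :: cur)
      refine ⟨t, ?_⟩
      rw [pvSplit, if_neg hx, ht]
      simp [hx]

-- replace with a single-character pattern is a per-character expansion.
theorem replace_go_single (c : Char) (new : List Char) : ∀ (l : List Char) (fuel : Nat) (acc : List Char),
    l.length ≤ fuel →
    PySem.Chars.replace.go [c] new fuel l acc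
      = acc.reverse ++ l.flatMap (fun x => if x = c then new else [x]) := by
  intro l
  induction l with
  | nil => intro fuel acc _; cases fuel <;> rw [PySem.Chars.replace.go] <;> simp
  | cons x t ih =>
    intro fuel acc hle
    cases fuel with
    | zero => simp at hle
    | succ m =>
      rw [PySem.Chars.replace.go]
      simp only [List.length_cons] at hle
      by_cases hx : x = c
      · subst hx
        rw [if_pos (by simp [List.isPrefixOf])]
        simp only [List.length_singleton, List.drop_succ_cons, List.drop_zero]
        rw [ih m (new.reverse ++ acc) (by omega)]
        simp
      · rw [if_neg (by simp [List.isPrefixOf]; exact fun h => hx h.symm)]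
        rw [ih m (x :: acc) (by omega)]
        simp [hx]

theorem replace_single (s : List Char) (c : Char) (new : List Char) :
    PySem.Chars.replace s [c] new = s.flatMap (fun x => if x = c then new else [x]) := by
  rw [PySem.Chars.replace, if_neg (by simp), replace_go_single c new s s.length [] le_rfl]
  simp

theorem char_eq_of_toNat (c : Char) (n : Nat) (h : c.toNat = n) : c = Char.ofNat n := by
  have h2 : Char.ofNat c.toNat = Char.ofNat n := by rw [h]
  rwa [Char.ofNat_toNat] at h2

theorem digit_cases (c : Char) (h : PySem.Chars.isdigit c = true) :
    c = '0' ∨ c = '1' ∨ c = '2' ∨ c = '3' ∨ c = '4' ∨ c = '5' ∨ c = '6' ∨ c = '7' ∨ c = '8' ∨ c = '9' := by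
  simp only [PySem.Chars.isdigit, Bool.and_eq_true, decide_eq_true_eq, Char.le_def,
    UInt32.le_iff_toNat_le] at h
  have hn : 48 ≤ c.toNat ∧ c.toNat ≤ 57 := h
  have h10 : c.toNat = 48 ∨ c.toNat = 49 ∨ c.toNat = 50 ∨ c.toNat = 51 ∨ c.toNat = 52 ∨ c.toNat = 53
      ∨ c.toNat = 54 ∨ c.toNat = 55 ∨ c.toNat = 56 ∨ c.toNat = 57 := by omega
  rcases h10 with h'|h'|h'|h'|h'|h'|h'|h'|h'|h' <;>
    (have hc := char_eq_of_toNat c _ h'; subst hc; decide)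

-- A's ten replace passes expand exactly each decimal digit of the input.
theorem loop_eq (s : String) :
    ((PySem.List.pyRange 0 10 1).foldl
      (fun f i => PySem.Str.replace f (PySem.Int.toStr i)
        (PySem.Str.join "" ["$_", PySem.Int.toStr i, "$"])) s).toList
    = s.toList.flatMap (fun c => if PySem.Chars.isdigit c then ['$','_',c,'$'] else [c]) := by
  have hr : PySem.List.pyRange 0 10 1 = [0,1,2,3,4,5,6,7,8,9] := by decide
  rw [hr]
  simp only [List.foldl_cons, List.foldl_nil]
  have hc0 : PySem.Int.toChars 0 = ['0'] := by decide
  have hc1 : PySem.Int.toChars 1 = ['1'] := by decide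
  have hc2 : PySem.Int.toChars 2 = ['2'] := by decide
  have hc3 : PySem.Int.toChars 3 = ['3'] := by decide
  have hc4 : PySem.Int.toChars 4 = ['4'] := by decide
  have hc5 : PySem.Int.toChars 5 = ['5'] := by decide
  have hc6 : PySem.Int.toChars 6 = ['6'] := by decide
  have hc7 : PySem.Int.toChars 7 = ['7'] := by decide
  have hc8 : PySem.Int.toChars 8 = ['8'] := by decide
  have hc9 : PySem.Int.toChars 9 = ['9'] := by decide
  simp only [PySem.Str.replace, PySem.Str.join, String.toList_ofList, PySem.Int.toList_toStr,
    hc0,hc1,hc2,hc3,hc4,hc5,hc6,hc7,hc8,hc9]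
  have hn0 : PySem.Chars.join "".toList (List.map String.toList ["$_", PySem.Int.toStr 0, "$"]) = ['$','_','0','$'] := by decide
  have hn1 : PySem.Chars.join "".toList (List.map String.toList ["$_", PySem.Int.toStr 1, "$"]) = ['$','_','1','$'] := by decide
  have hn2 : PySem.Chars.join "".toList (List.map String.toList ["$_", PySem.Int.toStr 2, "$"]) = ['$','_','2','$'] := by decide
  have hn3 : PySem.Chars.join "".toList (List.map String.toList ["$_", PySem.Int.toStr 3, "$"]) = ['$','_','3','$'] := by decide
  have hn4 : PySem.Chars.join "".toList (List.map String.toList ["$_", PySem.Int.toStr 4, "$"]) = ['$','_','4','$'] := by decide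
  have hn5 : PySem.Chars.join "".toList (List.map String.toList ["$_", PySem.Int.toStr 5, "$"]) = ['$','_','5','$'] := by decide
  have hn6 : PySem.Chars.join "".toList (List.map String.toList ["$_", PySem.Int.toStr 6, "$"]) = ['$','_','6','$'] := by decide
  have hn7 : PySem.Chars.join "".toList (List.map String.toList ["$_", PySem.Int.toStr 7, "$"]) = ['$','_','7','$'] := by decide
  have hn8 : PySem.Chars.join "".toList (List.map String.toList ["$_", PySem.Int.toStr 8, "$"]) = ['$','_','8','$'] := by decide
  have hn9 : PySem.Chars.join "".toList (List.map String.toList ["$_", PySem.Int.toStr 9, "$"]) = ['$','_','9','$'] := by decide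
  simp only [hn0,hn1,hn2,hn3,hn4,hn5,hn6,hn7,hn8,hn9, replace_single, List.flatMap_assoc]
  refine List.flatMap_congr fun c _ => ?_
  by_cases hd : PySem.Chars.isdigit c = true
  · rcases digit_cases c hd with rfl|rfl|rfl|rfl|rfl|rfl|rfl|rfl|rfl|rfl <;> decide
  · have h0 : c ≠ '0' := fun h => by subst h; exact hd (by decide)
    have h1 : c ≠ '1' := fun h => by subst h; exact hd (by decide)
    have h2 : c ≠ '2' := fun h => by subst h; exact hd (by decide)
    have h3 : c ≠ '3' := fun h => by subst h; exact hd (by decide)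
    have h4 : c ≠ '4' := fun h => by subst h; exact hd (by decide)
    have h5 : c ≠ '5' := fun h => by subst h; exact hd (by decide)
    have h6 : c ≠ '6' := fun h => by subst h; exact hd (by decide)
    have h7 : c ≠ '7' := fun h => by subst h; exact hd (by decide)
    have h8 : c ≠ '8' := fun h => by subst h; exact hd (by decide)
    have h9 : c ≠ '9' := fun h => by subst h; exact hd (by decide)
    simp [h0,h1,h2,h3,h4,h5,h6,h7,h8,h9,hd]

theorem join_nil_flatten (l : List (List Char)) : PySem.Chars.join [] l = l.flatten := by
  simp only [PySem.Chars.join, List.intercalate]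
  induction l with
  | nil => rfl
  | cons a t ih => cases t <;> simp_all

theorem empty_toList : ("" : String).toList = ([] : List Char) := rfl

-- B's single character scan produces the same expansion.
theorem body_eq (cs : List Char) : (PySem.Str.join ""
    (cs.map (fun c => if PySem.Chars.isdigit c then PySem.Str.join "" ["$_", String.ofList [c], "$"]
      else String.ofList [c]))).toList
    = cs.flatMap (fun c => if PySem.Chars.isdigit c then ['$','_',c,'$'] else [c]) := by
  simp only [PySem.Str.join, String.toList_ofList, empty_toList, join_nil_flatten, List.map_map,
    List.flatten_eq_flatMap, List.flatMap_map]
  refine List.flatMap_congr fun c _ => ?_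
  by_cases hd : PySem.Chars.isdigit c = true <;> simp [hd]

theorem join_pair (a b : String) : (PySem.Str.join "" [a, b]).toList = a.toList ++ b.toList := by
  simp [PySem.Str.join, join_nil_flatten]

-- the two branch conditions, related
theorem find_ne_zero_of_mem_not_prefix (formula : String) (c : Char)
    (hns : ¬ [c] <+: formula.toList) :
    PySem.Chars.find formula.toList [c] ≠ 0 := fun h =>
  hns ((pv_find_eq_zero_iff formula.toList [c]).mp h)

theorem find_neg_of_not_mem (formula : String) (c : Char) (hnm : c ∉ formula.toList) :
    PySem.Chars.find formula.toList [c] = -1 := by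
  rw [PySem.Chars.find_eq_neg_one_iff, List.singleton_infix_iff]
  exact hnm

theorem split_single_parts (formula : String) (c : Char) :
    ((PySem.Str.split? formula (String.ofList [c])).getD []) =
      (pvSplit c formula.toList []).map String.ofList := by
  simp [PySem.Str.split?, PySem.Chars.split?, String.toList_ofList, pv_splitOn_single]

-- ===== VERDICT (by name: the statement is the Claim_ definition above) =====
theorem to_latex_formula_spec : Claim_unchanged_to_latex_formula := by
  intro formula _ hnD
  unfold D_to_latex_formula at hnD
  rw [not_or, not_and_or, Bool.not_eq_true, Bool.not_eq_false] at hnD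
  unfold to_latex_formula to_latex_formula_alt
  dsimp only
  by_cases hm : '-' ∈ formula.toList
  · -- '-' present and not at position 0
    have hisin : PySem.Str.isIn "-" formula = true := by
      rw [PySem.Str.isIn_iff_infix]
      exact (List.singleton_infix_iff _ _).mpr hm
    have hns : ¬ (['-'] <+: formula.toList) := by
      intro hp
      exact absurd ((PySem.Chars.startswith_iff _ _).mpr hp) (by simpa [PySem.Str.startswith] using hnD.1)
    have hfind : PySem.Str.find formula "-" ≠ 0 := by
      simpa [PySem.Str.find] using find_ne_zero_of_mem_not_prefix formula '-' hns
    rw [if_pos hfind, if_pos hisin]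
    have hlen : 1 < PySem.List.len ((PySem.Str.split? formula "-").getD []) := by
      have h1 : ("-" : String) = String.ofList ['-'] := rfl
      rw [h1, split_single_parts formula '-', PySem.List.len_eq, List.length_map, pv_len_pvSplit]
      have := List.count_pos_iff.mpr hm
      omega
    rw [if_pos hlen]
    apply String.toList_inj.mp
    dsimp only
    rw [join_pair, join_pair, loop_eq, body_eq]
  · -- no '-' and (from ¬D_) no '+'
    have hp : '+' ∉ formula.toList := by
      intro hp
      rcases hnD.2 with h | h
      · exact h (by rw [PySem.Str.isIn_iff_infix]; exact (List.singleton_infix_iff _ _).mpr hp)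
      · exact hm ((List.singleton_infix_iff _ _).mp ((PySem.Str.isIn_iff_infix _ _).mp h))
    have hisin : ¬ PySem.Str.isIn "-" formula = true := by
      rw [PySem.Str.isIn_iff_infix, show ("-" : String).toList = ['-'] from rfl,
        List.singleton_infix_iff]
      exact hm
    have hisin2 : ¬ PySem.Str.isIn "+" formula = true := by
      rw [PySem.Str.isIn_iff_infix, show ("+" : String).toList = ['+'] from rfl,
        List.singleton_infix_iff]
      exact hp
    have hfind : PySem.Str.find formula "-" ≠ 0 := by
      have h := find_neg_of_not_mem formula '-' hm
      simp only [PySem.Str.find, show ("-" : String).toList = ['-'] from rfl]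
      omega
    rw [if_pos hfind, if_neg hisin, if_neg hisin2]
    have hw : ((PySem.Str.split? formula "-").getD []) = [formula] := by
      have h1 : ("-" : String) = String.ofList ['-'] := rfl
      rw [h1, split_single_parts formula '-', pv_pvSplit_not_mem '-' formula.toList [] hm]
      simp
    rw [hw]
    have hlen : ¬ (1 < PySem.List.len ([formula] : List String)) := by
      rw [PySem.List.len_eq]; simp
    rw [if_neg hlen]
    apply String.toList_inj.mp
    dsimp only
    have hg : PySem.List.pyGetD ([formula] : List String) 0 "" = formula := rfl
    rw [hg, join_pair, join_pair, loop_eq, body_eq]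

set_option maxRecDepth 8192 in
theorem to_latex_formula_changed : Claim_changed_to_latex_formula := by
  unfold Claim_changed_to_latex_formula; decide

-- first piece of the split (w[0]) is the run before the first separator
theorem parts0_toList (formula : String) (c : Char) :
    (PySem.List.pyGetD ((PySem.Str.split? formula (String.ofList [c])).getD []) 0 "").toList
      = formula.toList.takeWhile (· ≠ c) := by
  obtain ⟨t, ht⟩ := pv_pvSplit_head c formula.toList []
  rw [split_single_parts, ht]
  simp

theorem pv_dropWhile_ne (c : Char) : ∀ (l : List Char), c ∈ l →
    ∃ r, List.dropWhile (· ≠ c) l = c :: r := by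
  intro l
  induction l with
  | nil => intro h; simp at h
  | cons x t ih =>
    intro h
    by_cases hx : x = c
    · subst hx
      exact ⟨t, by simp⟩
    · rcases List.mem_cons.mp h with h' | h'
      · exact absurd h'.symm hx
      · obtain ⟨r, hr⟩ := ih h'
        exact ⟨r, by simpa [hx] using hr⟩

theorem to_latex_formula_tight : Claim_exact_to_latex_formula := by
  intro formula _ hD heq
  have heq' := congrArg String.toList heq
  unfold to_latex_formula to_latex_formula_alt at heq'
  dsimp only at heq'
  rcases hD with hs | ⟨hpin, hmf⟩
  · -- formula starts with '-': A keeps the leading '-', B emits the charge markup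
    have hpre : ['-'] <+: formula.toList := by
      have h := hs
      simp only [PySem.Str.startswith] at h
      exact (PySem.Chars.startswith_iff _ _).mp h
    obtain ⟨t, ht⟩ : ∃ t, formula.toList = '-' :: t := by
      obtain ⟨u, hu⟩ := hpre
      exact ⟨u, hu.symm⟩
    have hf0 : PySem.Str.find formula "-" = 0 := by
      simp only [PySem.Str.find]
      exact (pv_find_eq_zero_iff _ _).mpr hpre
    have hfp : PySem.Str.find formula "+" ≠ 0 := by
      simp only [PySem.Str.find]
      intro h
      obtain ⟨u, hu⟩ := (pv_find_eq_zero_iff _ _).mp h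
      rw [ht] at hu
      simp [show ("+" : String).toList = ['+'] from rfl] at hu
    have hmem : PySem.Str.isIn "-" formula = true := by
      rw [PySem.Str.isIn_iff_infix]; exact hpre.isInfix
    rw [if_neg (not_not_intro hf0), if_pos hfp, if_pos hmem] at heq'
    have hbodyA : (PySem.List.pyGetD ((PySem.Str.split? formula "+").getD []) 0 "").toList
        = '-' :: t.takeWhile (· ≠ '+') := by
      rw [show ("+" : String) = String.ofList ['+'] from rfl, parts0_toList, ht]
      simp
    have hbodyB : (PySem.List.pyGetD ((PySem.Str.split? formula "-").getD []) 0 "").toList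
        = [] := by
      rw [show ("-" : String) = String.ofList ['-'] from rfl, parts0_toList, ht]
      simp
    by_cases hlen : 1 < PySem.List.len ((PySem.Str.split? formula "+").getD [])
    · rw [if_pos hlen] at heq'
      dsimp only at heq'
      rw [join_pair, join_pair, loop_eq, body_eq, hbodyA, hbodyB] at heq'
      rw [show ("$^{+" : String) = String.ofList ['$','^','{','+'] from rfl,
        show ("$^{-" : String) = String.ofList ['$','^','{','-'] from rfl] at heq'
      simp [join_nil_flatten, show PySem.Chars.isdigit '-' = false from rfl] at heq'
    · rw [if_neg hlen] at heq'
      dsimp only at heq'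
      rw [join_pair, join_pair, loop_eq, body_eq, hbodyA, hbodyB] at heq'
      rw [show ("$^{-" : String) = String.ofList ['$','^','{','-'] from rfl] at heq'
      simp [join_nil_flatten, show PySem.Chars.isdigit '-' = false from rfl] at heq'
  · -- '+' present, '-' absent: A leaves the '+' in place, B replaces it by the markup
    have hm : '-' ∉ formula.toList := by
      intro h
      have : PySem.Str.isIn "-" formula = true := by
        rw [PySem.Str.isIn_iff_infix]
        exact (List.singleton_infix_iff _ _).mpr h
      rw [hmf] at this
      exact Bool.false_ne_true this
    have hmem : '+' ∈ formula.toList :=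
      (List.singleton_infix_iff _ _).mp ((PySem.Str.isIn_iff_infix _ _).mp hpin)
    have hfind : PySem.Str.find formula "-" ≠ 0 := by
      have h := find_neg_of_not_mem formula '-' hm
      simp only [PySem.Str.find, show ("-" : String).toList = ['-'] from rfl]
      omega
    have hw : ((PySem.Str.split? formula "-").getD []) = [formula] := by
      rw [show ("-" : String) = String.ofList ['-'] from rfl, split_single_parts,
        pv_pvSplit_not_mem '-' formula.toList [] hm]
      simp
    have hlen : ¬ (1 < PySem.List.len ((PySem.Str.split? formula "-").getD [])) := by
      rw [hw, PySem.List.len_eq]; simp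
    have hisin : ¬ PySem.Str.isIn "-" formula = true := by
      rw [hmf]; exact Bool.false_ne_true
    rw [if_pos hfind, if_neg hlen, if_neg hisin, if_pos hpin] at heq'
    dsimp only at heq'
    rw [join_pair, join_pair, loop_eq, body_eq] at heq'
    have hbodyA : (PySem.List.pyGetD ((PySem.Str.split? formula "-").getD []) 0 "").toList
        = formula.toList := by
      rw [hw]
      have hg : PySem.List.pyGetD ([formula] : List String) 0 "" = formula := rfl
      rw [hg]
    have hbodyB : (PySem.List.pyGetD ((PySem.Str.split? formula "+").getD []) 0 "").toList
        = formula.toList.takeWhile (· ≠ '+') := by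
      rw [show ("+" : String) = String.ofList ['+'] from rfl, parts0_toList]
    obtain ⟨r, hr⟩ := pv_dropWhile_ne '+' formula.toList hmem
    have hdec : formula.toList
        = formula.toList.takeWhile (· ≠ '+') ++ '+' :: r := by
      conv_lhs => rw [← List.takeWhile_append_dropWhile (p := (· ≠ '+')) (l := formula.toList)]
      rw [hr]
    rw [hbodyA, hbodyB] at heq'
    rw [show ("$^{+" : String) = String.ofList ['$','^','{','+'] from rfl] at heq'
    conv at heq' => lhs; rw [hdec]
    rw [List.flatMap_append] at heq'
    simp [join_nil_flatten, show PySem.Chars.isdigit '+' = false from rfl] at heq'
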